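-- pv_equiv track=rewrite | github.com/SantiagoBlascoArnaiz/CodificacionClavePrivada | encriptar.py | determinanteBinario
-- ===== SOURCE A (Python) =====
-- def sumaBinaria(num1,num2):
--     if(num1 == num2):
--         solucion = '0'
--     else:
--         solucion = '1'
--     return solucion
--
-- def restaBinaria(num1,num2):
--     return(sumaBinaria(num1,num2))
--
-- def multBinaria(num1,num2):
--     if(num1 == num2):
--         solucion = num1
--     else:
--         solucion = '0'
--     return solucion
--
-- def matrizInferior(matriz,fila):
--     inferior = []
--     for i in range(len(matriz)):
--         if(i != fila):
--             filaInferior = []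
--             for j in range(len(matriz[i]) - 1):
--                 filaInferior.append(matriz[i][j])
--             inferior.append(filaInferior)
--     return inferior
--
-- def determinanteBinario(matriz):
--
--     if(len(matriz) == 2):
--         return restaBinaria(multBinaria(matriz[0][0],matriz[1][1]),multBinaria(matriz[0][1],matriz[1][0]))
--     else:
--         det = '0'
--         for i in range(len(matriz)):
--             det = sumaBinaria(det,multBinaria(matriz[i][len(matriz)-1],determinanteBinario(matrizInferior(matriz,i))))
--         return det
-- ===== SOURCE B (Python) =====
-- def determinanteBinario(matriz):
--     # Bottom-up dynamic programming over row subsets: the cofactor recursion's value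
--     # depends only on the set of surviving rows (columns are always 0..len-1), so each
--     # of the 2^n subset values is computed once instead of once per recursion path.
--     n = len(matriz)
--
--     def suma(x, y):
--         return '0' if x == y else '1'
--
--     def mult(x, y):
--         return x if x == y else '0'
--
--     def par(i, j):
--         return suma(mult(matriz[i][0], matriz[j][1]), mult(matriz[i][1], matriz[j][0]))
--
--     if n == 2:
--         return par(0, 1)
--     V = [None] * (1 << n)
--     V[0] = '0'
--     for mask in range(1, 1 << n):
--         filas = [i for i in range(n) if mask >> i & 1]
--         s = len(filas)
--         if s == 2:
--             V[mask] = par(filas[0], filas[1])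
--         else:
--             acc = '0'
--             for i in filas:
--                 acc = suma(acc, mult(matriz[i][s - 1], V[mask ^ (1 << i)]))
--             V[mask] = acc
--     return V[(1 << n) - 1]
-- ===== Notes on version B (the rewrite author's own statement) =====
-- stated objective: faster
-- what changed: Replaced the naive cofactor recursion (each row subset is recomputed once per recursion path, O(n!) calls) by bottom-up dynamic programming over bitmask row subsets: the recursion's value depends only on the set of surviving rows, so each of the 2^n subset values is computed once, in ascending mask order.
import Mathlib
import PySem

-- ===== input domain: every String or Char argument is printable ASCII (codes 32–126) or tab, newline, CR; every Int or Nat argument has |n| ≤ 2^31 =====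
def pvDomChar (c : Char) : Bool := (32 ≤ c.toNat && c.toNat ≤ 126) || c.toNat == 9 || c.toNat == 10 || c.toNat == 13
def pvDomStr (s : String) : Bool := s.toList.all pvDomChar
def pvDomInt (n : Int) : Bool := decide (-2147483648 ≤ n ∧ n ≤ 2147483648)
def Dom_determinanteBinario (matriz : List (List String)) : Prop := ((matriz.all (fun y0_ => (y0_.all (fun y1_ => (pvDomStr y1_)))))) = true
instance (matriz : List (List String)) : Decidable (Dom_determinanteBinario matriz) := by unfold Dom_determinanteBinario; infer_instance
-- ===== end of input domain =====

-- B memoises A's cofactor recursion as a bottom-up DP over bitmask row subsets (objective: faster).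

-- ===== PORT A =====
def sumaBinaria (num1 num2 : String) : String := if num1 = num2 then "0" else "1"

def restaBinaria (num1 num2 : String) : String := sumaBinaria num1 num2

def multBinaria (num1 num2 : String) : String := if num1 = num2 then num1 else "0"

-- inner loop of matrizInferior: j over range(len(fila)-1), appending fila[j] (always in range, so getD is exact)
def matrizInferiorFila (fila : List String) : List String :=
  (List.range (fila.length - 1)).map (fun j => fila.getD j "")

def matrizInferior (matriz : List (List String)) (fila : Nat) : List (List String) :=
  (List.range matriz.length).foldl
    (fun inferior i => if i ≠ fila then inferior ++ [matrizInferiorFila (matriz.getD i [])] else inferior) []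

-- the foldl-with-filter shape of A's accumulator loop, proved once (used for termination below)
theorem foldl_if_append {α β : Type} (l : List α) (p : α → Prop) [DecidablePred p] (g : α → β)
    (init : List β) :
    l.foldl (fun acc i => if p i then acc ++ [g i] else acc) init
      = init ++ (l.filter (fun i => decide (p i))).map g := by
  induction l generalizing init with
  | nil => simp
  | cons a l ih =>
    by_cases h : p a <;> simp [List.foldl_cons, h, ih]

theorem matrizInferior_eq_filter (matriz : List (List String)) (fila : Nat) :
    matrizInferior matriz fila =
      ((List.range matriz.length).filter (fun i => i ≠ fila)).map
        (fun i => matrizInferiorFila (matriz.getD i [])) := by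
  unfold matrizInferior
  rw [foldl_if_append]; simp

theorem matrizInferior_length_lt (matriz : List (List String)) (fila : Nat)
    (h : fila < matriz.length) : (matrizInferior matriz fila).length < matriz.length := by
  rw [matrizInferior_eq_filter, List.length_map]
  have : fila ∈ List.range matriz.length := List.mem_range.mpr h
  calc ((List.range matriz.length).filter (fun i => i ≠ fila)).length
      < (List.range matriz.length).length := by
        apply List.length_filter_lt_length_iff_exists.mpr
        exact ⟨fila, this, by simp⟩
    _ = matriz.length := List.length_range

def determinanteBinario (matriz : List (List String)) : String :=
  if matriz.length = 2 then
    restaBinaria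
      (multBinaria ((matriz.getD 0 []).getD 0 "") ((matriz.getD 1 []).getD 1 ""))
      (multBinaria ((matriz.getD 0 []).getD 1 "") ((matriz.getD 1 []).getD 0 ""))
  else
    (List.range matriz.length).attach.foldl
      (fun det i =>
        sumaBinaria det
          (multBinaria ((matriz.getD i.1 []).getD (matriz.length - 1) "")
            (determinanteBinario (matrizInferior matriz i.1)))) "0"
termination_by matriz.length
decreasing_by
  exact matrizInferior_length_lt matriz i.1 (List.mem_range.mp i.2)

-- ===== PORT B =====
-- Source B's local helpers suma / mult / par
def bSuma (x y : String) : String := if x = y then "0" else "1"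

def bMult (x y : String) : String := if x = y then x else "0"

def bPar (matriz : List (List String)) (i j : Nat) : String :=
  bSuma (bMult ((matriz.getD i []).getD 0 "") ((matriz.getD j []).getD 1 ""))
        (bMult ((matriz.getD i []).getD 1 "") ((matriz.getD j []).getD 0 ""))

-- Source B's `[i for i in range(n) if mask >> i & 1]`
def bFilas (n mask : Nat) : List Nat :=
  (List.range n).filter (fun i => (mask >>> i) % 2 = 1)

-- the body of Source B's loop over masks: the value stored into V[mask]
def bValor (matriz : List (List String)) (V : List String) (mask : Nat) : String :=
  let filas := bFilas matriz.length mask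
  let s := filas.length
  if s = 2 then bPar matriz (filas.getD 0 0) (filas.getD 1 0)
  else
    filas.foldl
      (fun acc i =>
        bSuma acc (bMult ((matriz.getD i []).getD (s - 1) "") (V.getD (mask ^^^ (1 <<< i)) ""))) "0"

-- Source B fills the preallocated V at masks 1,2,… in ascending order; appending to a list that
-- starts as [V[0]] = ["0"] yields the same sequence of defined entries.
def bTabla (matriz : List (List String)) (t : Nat) : List String :=
  (List.range t).foldl (fun V k => V ++ [bValor matriz V (k + 1)]) ["0"]

def determinanteBinario_alt (matriz : List (List String)) : String :=
  if matriz.length = 2 then bPar matriz 0 1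
  else (bTabla matriz ((1 <<< matriz.length) - 1)).getD ((1 <<< matriz.length) - 1) ""

-- ===== PRECONDITION & SPEC =====
-- Pre_ is exactly A's no-raise domain: A raises IndexError iff some row is shorter than the
-- matrix (at depth d a surviving row needs an entry at column (matriz.length - d) - 1).
def Pre_determinanteBinario (matriz : List (List String)) : Prop :=
  ∀ fila ∈ matriz, matriz.length ≤ fila.length
instance (matriz : List (List String)) : Decidable (Pre_determinanteBinario matriz) := by
  unfold Pre_determinanteBinario; infer_instance

def pvWitness_determinanteBinario : List (List String) := [["1", "0"], ["0", "1"]]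

def Spec_determinanteBinario (matriz : List (List String)) (out : String) : Prop :=
  out = determinanteBinario_alt matriz
instance (matriz : List (List String)) (out : String) : Decidable (Spec_determinanteBinario matriz out) := by
  unfold Spec_determinanteBinario; infer_instance

-- ===== CLAIM (what is proved, stated in full; the proofs are below) =====
def Claim_equal_determinanteBinario : Prop := ∀ (matriz : List (List String)), Dom_determinanteBinario matriz → Pre_determinanteBinario matriz → Spec_determinanteBinario matriz (determinanteBinario matriz)

-- ===== LEMMAS AND PROOFS =====

-- ---- characterisation of A's matrizInferior ----

theorem matrizInferiorFila_eq (fila : List String) : matrizInferiorFila fila = fila.dropLast := by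
  apply List.ext_getElem
  · simp [matrizInferiorFila]
  · intro i h1 h2
    simp only [matrizInferiorFila, List.length_map, List.length_range] at h1
    simp only [matrizInferiorFila, List.getElem_map, List.getElem_range, List.getElem_dropLast]
    rw [List.getD_eq_getElem _ _ (by omega)]

theorem range_filter_ne (n fila : Nat) (h : fila < n) :
    (List.range n).filter (fun i => decide (i ≠ fila))
      = List.range fila ++ (List.range (n - (fila + 1))).map (· + (fila + 1)) := by
  obtain ⟨m, rfl⟩ : ∃ m, n = (fila + 1) + m := ⟨n - (fila + 1), by omega⟩
  have hm : fila + 1 + m - (fila + 1) = m := by omega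
  have h1 : List.range (fila + 1 + m)
      = (List.range fila ++ [fila]) ++ (List.range m).map (fun x => fila + 1 + x) := by
    rw [List.range_add, List.range_succ]
  rw [hm, h1, List.filter_append, List.filter_append, List.filter_map]
  have e1 : (List.range fila).filter (fun i => decide (i ≠ fila)) = List.range fila :=
    List.filter_eq_self.mpr (fun x hx => by
      simp only [ne_eq, decide_eq_true_eq]
      exact Nat.ne_of_lt (List.mem_range.mp hx))
  have e2 : ([fila].filter (fun i => decide (i ≠ fila))) = [] := by simp
  have e3 : ((List.range m).filter ((fun i => decide (i ≠ fila)) ∘ (fun x => fila + 1 + x)))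
      = List.range m :=
    List.filter_eq_self.mpr (fun x hx => by
      simp only [Function.comp_apply, ne_eq, decide_eq_true_eq]
      omega)
  rw [e1, e2, e3, List.append_nil]
  congr 1
  exact List.map_congr_left (fun x hx => by omega)

theorem matrizInferior_length (matriz : List (List String)) (fila : Nat)
    (h : fila < matriz.length) : (matrizInferior matriz fila).length = matriz.length - 1 := by
  rw [matrizInferior_eq_filter, List.length_map, range_filter_ne _ _ h]
  simp; omega

theorem matrizInferior_getD (matriz : List (List String)) (fila a : Nat)
    (hf : fila < matriz.length) (ha : a < matriz.length - 1) :
    (matrizInferior matriz fila).getD a []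
      = (matriz.getD (if a < fila then a else a + 1) []).dropLast := by
  rw [matrizInferior_eq_filter, range_filter_ne _ _ hf, List.map_append]
  by_cases hc : a < fila
  · rw [List.getD_append _ _ _ _ (by simpa using hc), if_pos hc,
        List.getD_eq_getElem _ _ (by simpa using hc)]
    simp [matrizInferiorFila_eq]
  · rw [List.getD_append_right _ _ _ _ (by simpa using hc), if_neg hc]
    have hlen : a - (List.range fila).length < ((List.range (matriz.length - (fila + 1))).map (· + (fila + 1))).length := by
      simp; omega
    rw [List.getD_eq_getElem _ _ (by simpa using hlen)]
    simp only [List.getElem_map, List.getElem_range, List.length_range, List.length_map]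
    have he : a - fila + (fila + 1) = a + 1 := by omega
    rw [he, matrizInferiorFila_eq]

theorem matrizInferior_eq_eraseIdx (L : List (List String)) (i : Nat) (h : i < L.length) :
    matrizInferior L i = (L.eraseIdx i).map List.dropLast := by
  apply List.ext_getElem
  · rw [matrizInferior_length _ _ h, List.length_map, List.length_eraseIdx, if_pos h]
  · intro a h1 h2
    have h1' : a < L.length - 1 := by
      rw [matrizInferior_length _ _ h] at h1; exact h1
    rw [List.getElem_map, List.getElem_eraseIdx,
        ← List.getD_eq_getElem (matrizInferior L i) ([] : List String) h1,
        matrizInferior_getD _ _ _ h h1']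
    by_cases hai : a < i
    · rw [if_pos hai, dif_pos hai, List.getD_eq_getElem _ _ (by omega)]
    · rw [if_neg hai, dif_neg hai, List.getD_eq_getElem _ _ (by omega)]

-- ---- unfolding equations of A's port ----

theorem determinanteBinario_two (m : List (List String)) (h : m.length = 2) :
    determinanteBinario m =
      restaBinaria
        (multBinaria ((m.getD 0 []).getD 0 "") ((m.getD 1 []).getD 1 ""))
        (multBinaria ((m.getD 0 []).getD 1 "") ((m.getD 1 []).getD 0 "")) := by
  rw [determinanteBinario, if_pos h]

theorem determinanteBinario_else (m : List (List String)) (h : ¬ m.length = 2) :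
    determinanteBinario m =
      (List.range m.length).foldl
        (fun det i =>
          sumaBinaria det
            (multBinaria ((m.getD i []).getD (m.length - 1) "")
              (determinanteBinario (matrizInferior m i)))) "0" := by
  rw [determinanteBinario, if_neg h]
  exact List.foldl_attach
    (f := fun det i =>
      sumaBinaria det
        (multBinaria ((m.getD i []).getD (m.length - 1) "")
          (determinanteBinario (matrizInferior m i)))) ..

-- ---- basic list utilities ----

theorem getD_take {α : Type} (r : List α) (s j : Nat) (d : α) (h : j < s) :
    (r.take s).getD j d = r.getD j d := by
  rw [List.getD_eq_getElem?_getD, List.getD_eq_getElem?_getD, List.getElem?_take, if_pos h]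

theorem dropLast_take {α : Type} (r : List α) (s : Nat) (h : s ≤ r.length) :
    (r.take s).dropLast = r.take (s - 1) := by
  rw [List.dropLast_eq_take, List.take_take, List.length_take]
  congr 1
  omega

theorem range_map_getD {α : Type} (l : List α) (d : α) :
    (List.range l.length).map (fun i => l.getD i d) = l := by
  apply List.ext_getElem
  · simp
  · intro i h1 h2
    simp only [List.getElem_map, List.getElem_range]
    rw [List.getD_eq_getElem _ _ h2]

theorem foldl_eq_foldl_range {α : Type} (l : List α) (d : α) (f : String → α → String)
    (b : String) :
    l.foldl f b = (List.range l.length).foldl (fun a i => f a (l.getD i d)) b := by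
  conv_lhs => rw [← range_map_getD l d]
  rw [List.foldl_map]

theorem nodup_eraseIdx_eq_filter {α : Type} [DecidableEq α] :
    ∀ (l : List α), l.Nodup → ∀ (i : Nat) (h : i < l.length),
      l.eraseIdx i = l.filter (fun x => decide (x ≠ l[i])) := by
  intro l
  induction l with
  | nil => intro _ i h; simp at h
  | cons a l ih =>
    intro hnd i h
    match i with
    | 0 =>
      simp only [List.eraseIdx, List.getElem_cons_zero, List.filter_cons]
      rw [if_neg (by simp)]
      rw [List.filter_eq_self.mpr (fun x hx => by
        simp only [ne_eq, decide_eq_true_eq]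
        intro he
        exact (List.nodup_cons.mp hnd).1 (he ▸ hx))]
    | i + 1 =>
      simp only [List.eraseIdx, List.getElem_cons_succ, List.filter_cons]
      rw [if_pos (by
        simp only [ne_eq, decide_eq_true_eq]
        intro he
        exact (List.nodup_cons.mp hnd).1 (he ▸ List.getElem_mem _))]
      rw [ih (List.nodup_cons.mp hnd).2 i (by simpa using h)]
      rfl

-- ---- bitmask facts ----

theorem bit_eq_testBit (mask i : Nat) : decide ((mask >>> i) % 2 = 1) = mask.testBit i := by
  rw [Nat.testBit, Nat.shiftRight_eq_div_pow]
  rcases Nat.mod_two_eq_zero_or_one (mask / 2 ^ i) with h | h <;> simp [h]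

theorem testBit_xor_pow (mask r j : Nat) :
    (mask ^^^ (1 <<< r)).testBit j = ((mask.testBit j) ^^ decide (r = j)) := by
  rw [Nat.testBit_xor, Nat.shiftLeft_eq, one_mul, Nat.testBit_two_pow]

theorem xor_bit_lt (mask r : Nat) (h : mask.testBit r = true) :
    mask ^^^ (1 <<< r) < mask := by
  apply Nat.lt_of_testBit r
  · rw [testBit_xor_pow, h]; simp
  · exact h
  · intro j hj
    rw [testBit_xor_pow, decide_eq_false (by omega)]
    simp

theorem mem_bFilas (n mask i : Nat) : i ∈ bFilas n mask ↔ (i < n ∧ mask.testBit i = true) := by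
  rw [bFilas, List.mem_filter, List.mem_range, ← bit_eq_testBit]

theorem nodup_bFilas (n mask : Nat) : (bFilas n mask).Nodup :=
  (List.nodup_range).filter _

theorem bFilas_le (n mask : Nat) : (bFilas n mask).length ≤ n := by
  calc (bFilas n mask).length ≤ (List.range n).length := List.length_filter_le _ _
    _ = n := List.length_range

theorem bFilas_xor (n mask r : Nat) (hr : r ∈ bFilas n mask) :
    bFilas n (mask ^^^ (1 <<< r)) = (bFilas n mask).filter (fun x => decide (x ≠ r)) := by
  have hrb : mask.testBit r = true := ((mem_bFilas n mask r).mp hr).2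
  rw [bFilas, bFilas, List.filter_filter]
  apply List.filter_congr
  intro x hx
  rw [bit_eq_testBit, bit_eq_testBit, testBit_xor_pow]
  by_cases hxr : x = r
  · subst hxr; simp [hrb]
  · simp [hxr, Ne.symm hxr]

-- ---- the submatrix selected by a mask: rows in the mask, columns 0..s-1 ----

def subM (m : List (List String)) (mask : Nat) : List (List String) :=
  (bFilas m.length mask).map
    (fun r => (m.getD r []).take (bFilas m.length mask).length)

theorem subM_length (m : List (List String)) (mask : Nat) :
    (subM m mask).length = (bFilas m.length mask).length := List.length_map ..

theorem subM_getD (m : List (List String)) (mask i : Nat)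
    (h : i < (bFilas m.length mask).length) :
    (subM m mask).getD i []
      = (m.getD ((bFilas m.length mask).getD i 0) []).take (bFilas m.length mask).length := by
  rw [subM, List.getD_eq_getElem _ _ (by rw [List.length_map]; exact h), List.getElem_map,
      List.getD_eq_getElem _ _ h]

theorem subM_row_long (m : List (List String)) (mask : Nat)
    (hpre : ∀ fila ∈ m, m.length ≤ fila.length) (r : Nat) (hr : r ∈ bFilas m.length mask) :
    (bFilas m.length mask).length ≤ (m.getD r []).length := by
  have hrn : r < m.length := ((mem_bFilas _ _ _).mp hr).1
  have hmem : m.getD r [] ∈ m := by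
    rw [List.getD_eq_getElem _ _ hrn]; exact List.getElem_mem _
  calc (bFilas m.length mask).length ≤ m.length := bFilas_le _ _
    _ ≤ (m.getD r []).length := hpre _ hmem

-- removing the i-th row of the submatrix = clearing the corresponding bit of the mask
theorem subM_minor (m : List (List String)) (mask i : Nat)
    (hpre : ∀ fila ∈ m, m.length ≤ fila.length)
    (hi : i < (bFilas m.length mask).length) :
    matrizInferior (subM m mask) i
      = subM m (mask ^^^ (1 <<< ((bFilas m.length mask).getD i 0))) := by
  set filas := bFilas m.length mask with hfdef
  set r := filas.getD i 0 with hrdef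
  have hrval : r = filas[i] := by rw [hrdef, List.getD_eq_getElem _ _ hi]
  have hrmem : r ∈ filas := by rw [hrval]; exact List.getElem_mem _
  have herase : bFilas m.length (mask ^^^ (1 <<< r)) = filas.eraseIdx i := by
    rw [hfdef, bFilas_xor _ _ _ (by rw [← hfdef]; exact hrmem), ← hfdef,
        nodup_eraseIdx_eq_filter filas (by rw [hfdef]; exact nodup_bFilas ..) i hi, hrval]
  have hlene : (filas.eraseIdx i).length = filas.length - 1 := by
    rw [List.length_eraseIdx, if_pos hi]
  rw [matrizInferior_eq_eraseIdx _ _ (by rw [subM_length]; exact hi)]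
  rw [subM, ← hfdef, List.eraseIdx_map, subM, herase, hlene, List.map_map]
  apply List.map_congr_left
  intro x hx
  have hxf : x ∈ filas := List.mem_of_mem_eraseIdx hx
  simp only [Function.comp_apply]
  rw [dropLast_take _ _ (subM_row_long m mask hpre x (by rw [hfdef] at hxf; exact hxf))]

-- ---- unfolding the DP table ----

theorem bTabla_succ (m : List (List String)) (t : Nat) :
    bTabla m (t + 1) = bTabla m t ++ [bValor m (bTabla m t) (t + 1)] := by
  rw [bTabla, bTabla, List.range_succ, List.foldl_append, List.foldl_cons, List.foldl_nil]

theorem bTabla_length (m : List (List String)) (t : Nat) : (bTabla m t).length = t + 1 := by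
  induction t with
  | zero => rfl
  | succ t ih => simp [bTabla_succ, ih]

theorem bTabla_getD_stable (m : List (List String)) (t j : Nat) (h : j ≤ t) :
    (bTabla m (t + 1)).getD j "" = (bTabla m t).getD j "" := by
  rw [bTabla_succ, List.getD_append _ _ _ _ (by rw [bTabla_length]; omega)]

-- ---- the step lemma: bValor computes A's value on the selected submatrix ----

theorem bValor_correct (m : List (List String)) (V : List String) (mask : Nat)
    (hpre : ∀ fila ∈ m, m.length ≤ fila.length)
    (hV : ∀ mask' < mask, V.getD mask' "" = determinanteBinario (subM m mask')) :
    bValor m V mask = determinanteBinario (subM m mask) := by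
  rw [bValor]
  set filas := bFilas m.length mask with hfdef
  set s := filas.length with hsdef
  by_cases hs : s = 2
  · rw [if_pos hs, determinanteBinario_two _ (by rw [subM_length, ← hfdef, ← hsdef]; exact hs)]
    have h0 : 0 < s := by omega
    have h1 : 1 < s := by omega
    rw [subM_getD _ _ _ (by rw [← hfdef, ← hsdef]; exact h0),
        subM_getD _ _ _ (by rw [← hfdef, ← hsdef]; exact h1), ← hfdef, ← hsdef]
    rw [getD_take _ _ _ _ (by omega), getD_take _ _ _ _ (by omega),
        getD_take _ _ _ _ (by omega), getD_take _ _ _ _ (by omega)]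
    rfl
  · rw [if_neg hs,
        determinanteBinario_else _ (by rw [subM_length, ← hfdef, ← hsdef]; exact hs),
        subM_length, ← hfdef, ← hsdef]
    rw [foldl_eq_foldl_range filas 0
      (fun acc i =>
        bSuma acc (bMult ((m.getD i []).getD (s - 1) "") (V.getD (mask ^^^ (1 <<< i)) ""))) "0"]
    rw [← hsdef]
    apply PySem.List.foldl_congr_mem
    intro acc i hi
    have his : i < s := List.mem_range.mp hi
    set r := filas.getD i 0 with hrdef
    have hrmem : r ∈ filas := by
      rw [hrdef, List.getD_eq_getElem _ _ his]; exact List.getElem_mem _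
    have hrbit : mask.testBit r = true := ((mem_bFilas _ _ _).mp (by rw [hfdef] at hrmem; exact hrmem)).2
    have hmask' : mask ^^^ (1 <<< r) < mask := xor_bit_lt mask r hrbit
    have hrow : (subM m mask).getD i [] = (m.getD r []).take s := by
      rw [subM_getD _ _ _ (by rw [← hfdef, ← hsdef]; exact his), ← hfdef, ← hsdef, ← hrdef]
    rw [hrow, getD_take _ _ _ _ (by omega)]
    rw [hV _ hmask', subM_minor m mask i hpre (by rw [← hfdef, ← hsdef]; exact his), ← hfdef, ← hrdef]
    rfl

-- ---- the DP invariant ----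

theorem bTabla_correct (m : List (List String))
    (hpre : ∀ fila ∈ m, m.length ≤ fila.length) :
    ∀ t, ∀ mask ≤ t, (bTabla m t).getD mask "" = determinanteBinario (subM m mask) := by
  intro t
  induction t with
  | zero =>
    intro mask hm
    obtain rfl : mask = 0 := by omega
    have hsub : subM m 0 = [] := by
      rw [subM]
      have : bFilas m.length 0 = [] := by
        apply List.filter_eq_nil_iff.mpr
        intro a ha
        rw [bit_eq_testBit, Nat.zero_testBit]
        simp
      rw [this]; rfl
    rw [hsub, determinanteBinario_else [] (by simp)]
    rfl
  | succ t ih =>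
    intro mask hm
    by_cases hmt : mask ≤ t
    · rw [bTabla_getD_stable _ _ _ hmt]
      exact ih mask hmt
    · obtain rfl : mask = t + 1 := by omega
      rw [bTabla_succ,
          List.getD_append_right _ _ _ _ (by rw [bTabla_length]),
          bTabla_length]
      have h0 : t + 1 - (t + 1) = 0 := by omega
      rw [h0]
      simp only [List.getD_cons_zero]
      exact bValor_correct m (bTabla m t) (t + 1) hpre (fun mask' hm' => ih mask' (by omega))

-- ---- A's value only depends on the first n columns of the n rows ----

theorem dB_congr : ∀ (s : Nat) (L L' : List (List String)),
    L.length = s → L'.length = s →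
    (∀ f ∈ L, s ≤ f.length) → (∀ f ∈ L', s ≤ f.length) →
    (∀ i < s, (L.getD i []).take s = (L'.getD i []).take s) →
    determinanteBinario L = determinanteBinario L' := by
  intro s
  induction s using Nat.strong_induction_on with
  | _ s ih =>
    intro L L' hL hL' hlong hlong' htake
    by_cases hs : s = 2
    · subst hs
      rw [determinanteBinario_two _ hL, determinanteBinario_two _ hL']
      have e : ∀ i j, i < 2 → j < 2 → (L.getD i []).getD j "" = (L'.getD i []).getD j "" := by
        intro i j hi hj
        rw [← getD_take (L.getD i []) 2 j "" hj, ← getD_take (L'.getD i []) 2 j "" hj,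
            htake i hi]
      try rw [e 0 0 (by omega) (by omega)]
      try rw [e 1 1 (by omega) (by omega)]
      try rw [e 0 1 (by omega) (by omega)]
      try rw [e 1 0 (by omega) (by omega)]
    · rw [determinanteBinario_else _ (by rw [hL]; exact hs),
          determinanteBinario_else _ (by rw [hL']; exact hs), hL, hL']
      apply PySem.List.foldl_congr_mem
      intro acc i hi
      have his : i < s := List.mem_range.mp hi
      have hent : (L.getD i []).getD (s - 1) "" = (L'.getD i []).getD (s - 1) "" := by
        by_cases hs0 : s = 0
        · omega
        · rw [← getD_take (L.getD i []) s _ "" (by omega),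
              ← getD_take (L'.getD i []) s _ "" (by omega), htake i his]
      rw [hent]
      congr 2
      by_cases hs1 : s = 1
      · -- both minors are empty
        have e1 : matrizInferior L i = [] := by
          have := matrizInferior_length L i (by omega)
          rw [hL, hs1] at this
          exact List.length_eq_zero_iff.mp (by omega)
        have e2 : matrizInferior L' i = [] := by
          have := matrizInferior_length L' i (by omega)
          rw [hL', hs1] at this
          exact List.length_eq_zero_iff.mp (by omega)
        rw [e1, e2]
      · apply ih (s - 1) (by omega)
        · rw [matrizInferior_length _ _ (by omega), hL]
        · rw [matrizInferior_length _ _ (by omega), hL']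
        · intro f hf
          rw [matrizInferior_eq_eraseIdx _ _ (by omega)] at hf
          rcases List.mem_map.mp hf with ⟨f0, hf0, rfl⟩
          have : s ≤ f0.length := hlong _ (List.mem_of_mem_eraseIdx hf0)
          rw [List.length_dropLast]
          omega
        · intro f hf
          rw [matrizInferior_eq_eraseIdx _ _ (by omega)] at hf
          rcases List.mem_map.mp hf with ⟨f0, hf0, rfl⟩
          have : s ≤ f0.length := hlong' _ (List.mem_of_mem_eraseIdx hf0)
          rw [List.length_dropLast]
          omega
        · intro a ha
          have haL : a < L.length - 1 := by omega
          have haL' : a < L'.length - 1 := by omega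
          rw [matrizInferior_getD _ _ _ (by omega) haL,
              matrizInferior_getD _ _ _ (by omega) haL']
          set σ := if a < i then a else a + 1 with hσ
          have hσs : σ < s := by rw [hσ]; split <;> omega
          have h1 : s ≤ (L.getD σ []).length := by
            by_cases hσL : σ < L.length
            · apply hlong
              rw [List.getD_eq_getElem _ _ hσL]; exact List.getElem_mem _
            · omega
          have h1' : s ≤ (L'.getD σ []).length := by
            by_cases hσL : σ < L'.length
            · apply hlong'
              rw [List.getD_eq_getElem _ _ hσL]; exact List.getElem_mem _
            · omega
          have key : ∀ (r : List String), s ≤ r.length →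
              r.dropLast.take (s - 1) = (r.take s).take (s - 1) := by
            intro r hr
            rw [List.dropLast_eq_take, List.take_take, List.take_take]
            congr 1
            omega
          rw [key _ h1, key _ h1', htake σ hσs]

-- ---- assembling the verdict ----

theorem subM_full (m : List (List String)) (hpre : ∀ fila ∈ m, m.length ≤ fila.length) :
    determinanteBinario (subM m ((1 <<< m.length) - 1)) = determinanteBinario m := by
  have hfull : bFilas m.length ((1 <<< m.length) - 1) = List.range m.length := by
    have : (1 : Nat) <<< m.length = 2 ^ m.length := by rw [Nat.shiftLeft_eq, one_mul]
    rw [bFilas, this]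
    apply List.filter_eq_self.mpr
    intro x hx
    rw [bit_eq_testBit, Nat.testBit_two_pow_sub_one]
    simpa using List.mem_range.mp hx
  apply dB_congr m.length
  · rw [subM_length, hfull, List.length_range]
  · rfl
  · intro f hf
    rw [subM, hfull, List.length_range] at hf
    rcases List.mem_map.mp hf with ⟨r, hr, rfl⟩
    have hrn : r < m.length := List.mem_range.mp hr
    have hmem : m.getD r [] ∈ m := by
      rw [List.getD_eq_getElem _ _ hrn]; exact List.getElem_mem _
    rw [List.length_take]
    have := hpre _ hmem
    omega
  · exact hpre
  · intro i hi
    have hrr : i < (List.range m.length).length := by simpa using hi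
    rw [subM_getD _ _ _ (by rw [hfull, List.length_range]; exact hi), hfull, List.length_range,
        List.getD_eq_getElem _ _ hrr, List.getElem_range, List.take_take, Nat.min_self]

-- ===== VERDICT (by name: the statement is the Claim_ definition above) =====
theorem determinanteBinario_spec : Claim_equal_determinanteBinario := by
  intro matriz _ hpre
  unfold Spec_determinanteBinario determinanteBinario_alt
  by_cases h2 : matriz.length = 2
  · rw [if_pos h2, determinanteBinario_two _ h2]
    rfl
  · rw [if_neg h2]
    rw [bTabla_correct matriz hpre ((1 <<< matriz.length) - 1) ((1 <<< matriz.length) - 1)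
          (by omega),
        subM_full matriz hpre]
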